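-- pv_equiv track=rewrite | github.com/djdjz7/dsa-b-2025-spring | routine/0429-count-covered-buildings.py | countCoveredBuildings
-- ===== SOURCE A (Python) =====
-- from typing import List
-- from collections import defaultdict
--
-- INF = float("inf")
--
-- def countCoveredBuildings(n: int, buildings: List[List[int]]) -> int:
--     hsr = defaultdict(lambda: (INF, -INF))
--     hsc = defaultdict(lambda: (INF, -INF))
--     for x, y in buildings:
--         hsr[x] = (min(hsr[x][0], y), max(hsr[x][1], y))
--         hsc[y] = (min(hsc[y][0], x), max(hsc[y][1], x))
--     s = 0
--     for x, y in buildings: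
--         if hsr[x][0] < y < hsr[x][1] and hsc[y][0] < x < hsc[y][1]:
--             s += 1
--     return s
-- ===== SOURCE B (Python) =====
-- from typing import List
--
-- def countCoveredBuildings(n: int, buildings: List[List[int]]) -> int:
--     # A building is covered iff some building is strictly below and some strictly
--     # above it in its row, and some strictly left and some strictly right in its column.
--     pts = [(b[0], b[1]) for b in buildings]
--     def covered(x, y):
--         return (any(p == x and q < y for p, q in pts)
--                 and any(p == x and q > y for p, q in pts)
--                 and any(q == y and p < x for p, q in pts)
--                 and any(q == y and p > x for p, q in pts))
--     return sum(1 for x, y in pts if covered(x, y))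
-- ===== Notes on version B (the rewrite author's own statement) =====
-- stated objective: alternative
-- what changed: Replaces the hash-map running min/max tables with direct existential scans: a building counts iff some building lies strictly below/above it in its row and strictly left/right in its column; no dictionaries are built.
import Mathlib
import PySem

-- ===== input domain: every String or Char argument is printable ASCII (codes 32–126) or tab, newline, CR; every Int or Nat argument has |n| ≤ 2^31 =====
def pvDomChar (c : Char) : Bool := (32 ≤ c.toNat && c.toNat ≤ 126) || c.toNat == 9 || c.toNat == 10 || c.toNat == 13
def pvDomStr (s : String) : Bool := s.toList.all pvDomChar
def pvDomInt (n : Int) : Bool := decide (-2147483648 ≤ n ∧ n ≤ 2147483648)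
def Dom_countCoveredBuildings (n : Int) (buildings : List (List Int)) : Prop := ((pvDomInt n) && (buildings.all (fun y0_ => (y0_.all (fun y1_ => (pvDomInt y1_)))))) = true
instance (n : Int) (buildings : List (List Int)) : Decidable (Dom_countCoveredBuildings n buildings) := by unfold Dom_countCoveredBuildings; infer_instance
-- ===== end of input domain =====

-- B replaces A's hash-map running min/max tables with direct existential scans
-- (a building counts iff some building is strictly below/above in its row and
-- strictly left/right in its column); an alternative algorithm, not faster.


-- shared by both ports: 'for x, y in buildings' / '(b[0], b[1])'; under Pre_ every row has length 2, so getD is exact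
def pvPt (b : List Int) : Int × Int := (b.getD 0 0, b.getD 1 0)

-- ===== PORT A =====
-- hsr[x] = (min(hsr[x][0], y), max(hsr[x][1], y)) with default (INF, -INF): on a fresh key this stores (y, y)
def cbStep (d : PySem.Dict Int (Int × Int)) (k v : Int) : PySem.Dict Int (Int × Int) :=
  match d.get? k with
  | none => d.insert k (v, v)
  | some (a, b) => d.insert k (min a v, max b v)

-- hsr[x][0] < y < hsr[x][1]; a missing key would give (INF, -INF), on which the comparison is false
def cbCond (d : PySem.Dict Int (Int × Int)) (k v : Int) : Bool :=
  match d.get? k with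
  | none => false
  | some (lo, hi) => decide (lo < v) && decide (v < hi)

def countCoveredBuildings (n : Int) (buildings : List (List Int)) : Int :=
  let pts := buildings.map pvPt
  let dd := pts.foldl
    (fun (dd : PySem.Dict Int (Int × Int) × PySem.Dict Int (Int × Int)) p =>
      (cbStep dd.1 p.1 p.2, cbStep dd.2 p.2 p.1))
    (PySem.Dict.empty, PySem.Dict.empty)
  pts.foldl (fun s p => if cbCond dd.1 p.1 p.2 && cbCond dd.2 p.2 p.1 then s + 1 else s) 0

-- ===== PORT B =====
def cbCovered (pts : List (Int × Int)) (x y : Int) : Bool :=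
  pts.any (fun p => p.1 == x && decide (p.2 < y)) &&
  pts.any (fun p => p.1 == x && decide (y < p.2)) &&
  pts.any (fun p => p.2 == y && decide (p.1 < x)) &&
  pts.any (fun p => p.2 == y && decide (x < p.1))

def countCoveredBuildings_alt (n : Int) (buildings : List (List Int)) : Int :=
  let pts := buildings.map pvPt
  ((pts.countP (fun p => cbCovered pts p.1 p.2) : Nat) : Int)

-- ===== PRECONDITION & SPEC =====
-- Pre_ excludes rows that are not length-2 lists: 'for x, y in buildings' raises ValueError there.
def Pre_countCoveredBuildings (n : Int) (buildings : List (List Int)) : Prop :=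
  ∀ b ∈ buildings, b.length = 2
instance (n : Int) (buildings : List (List Int)) : Decidable (Pre_countCoveredBuildings n buildings) := by unfold Pre_countCoveredBuildings; infer_instance
def pvWitness_countCoveredBuildings : Int × List (List Int) :=
  (5, [[1, 1], [1, 3], [1, 2], [0, 2], [3, 2]])

def Spec_countCoveredBuildings (n : Int) (buildings : List (List Int)) (out : Int) : Prop := out = countCoveredBuildings_alt n buildings
instance (n : Int) (buildings : List (List Int)) (out : Int) : Decidable (Spec_countCoveredBuildings n buildings out) := by unfold Spec_countCoveredBuildings; infer_instance

-- ===== CLAIM (what is proved, stated in full; the proofs are below) =====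
def Claim_equal_countCoveredBuildings : Prop := ∀ (n : Int) (buildings : List (List Int)), Dom_countCoveredBuildings n buildings → Pre_countCoveredBuildings n buildings → Spec_countCoveredBuildings n buildings (countCoveredBuildings n buildings)

-- ===== LEMMAS AND PROOFS =====

theorem foldl_pair {α β γ : Type} (f : α → γ → α) (g : β → γ → β) (l : List γ) (a : α) (b : β) :
    l.foldl (fun (p : α × β) c => (f p.1 c, g p.2 c)) (a, b) = (l.foldl f a, l.foldl g b) := by
  induction l generalizing a b with
  | nil => rfl
  | cons c t ih => simp [List.foldl_cons, ih]

-- characterisation of the min/max dict: get? k is the min/max fold over the values filed under k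
theorem cbStep_get (pts : List (Int × Int)) (d : PySem.Dict Int (Int × Int)) (k : Int) :
    (pts.foldl (fun d p => cbStep d p.1 p.2) d).get? k =
      ((pts.filter (fun p => p.1 == k)).map Prod.snd).foldl
        (fun o v => some (match o with | none => (v, v) | some (a, b) => (min a v, max b v)))
        (d.get? k) := by
  induction pts generalizing d with
  | nil => rfl
  | cons p t ih =>
    obtain ⟨px, py⟩ := p
    simp only [List.foldl_cons, List.filter_cons]
    rw [ih]
    by_cases h : px = k
    · subst h
      simp only [beq_self_eq_true, if_true, List.map_cons, List.foldl_cons, cbStep]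
      cases hd : d.get? px with
      | none => simp [PySem.Dict.get?_insert_self]
      | some ab => obtain ⟨a, b⟩ := ab; simp [PySem.Dict.get?_insert_self]
    · have hb : ((px, py).1 == k) = false := by simp [h]
      simp only [hb, Bool.false_eq_true, if_false]
      have hstep : (cbStep d px py).get? k = d.get? k := by
        unfold cbStep
        cases d.get? px with
        | none =>
          apply PySem.Dict.get?_insert_of_ne
          exact fun he => h (Eq.symm he)
        | some ab =>
          obtain ⟨a, b⟩ := ab
          apply PySem.Dict.get?_insert_of_ne
          exact fun he => h (Eq.symm he)
      rw [hstep]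

theorem foldl_min_lt (ys : List Int) (a v : Int) :
    decide (ys.foldl min a < v) = (decide (a < v) || ys.any (fun z => decide (z < v))) := by
  induction ys generalizing a with
  | nil => simp
  | cons z t ih =>
    rw [List.foldl_cons, List.any_cons, ih]
    have hmin : decide (min a z < v) = (decide (a < v) || decide (z < v)) := by
      by_cases h1 : a < v <;> by_cases h2 : z < v <;> simp [h1, h2]
    rw [hmin, Bool.or_assoc]

theorem foldl_max_gt (ys : List Int) (b v : Int) :
    decide (v < ys.foldl max b) = (decide (v < b) || ys.any (fun z => decide (v < z))) := by
  induction ys generalizing b with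
  | nil => simp
  | cons z t ih =>
    rw [List.foldl_cons, List.any_cons, ih]
    have hmax : decide (v < max b z) = (decide (v < b) || decide (v < z)) := by
      by_cases h1 : v < b <;> by_cases h2 : v < z <;> simp [h1, h2]
    rw [hmax, Bool.or_assoc]

theorem rowFold_some (t : List Int) (ab : Int × Int) :
    t.foldl (fun o w => some (match o with | none => (w, w) | some (a, b) => (min a w, max b w)))
        (some ab) =
      some (t.foldl (fun (ab : Int × Int) w => (min ab.1 w, max ab.2 w)) ab) := by
  induction t generalizing ab with
  | nil => rfl
  | cons w r ih =>
    obtain ⟨a, b⟩ := ab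
    simp only [List.foldl_cons]
    exact ih _

-- A's membership test over the fold result = two existential scans over the value list
theorem cond_rowFold (ys : List Int) (v : Int) :
    (match ys.foldl
        (fun o w => some (match o with | none => (w, w) | some (a, b) => (min a w, max b w)))
        (none : Option (Int × Int)) with
      | none => false
      | some (lo, hi) => decide (lo < v) && decide (v < hi)) =
    (ys.any (fun z => decide (z < v)) && ys.any (fun z => decide (v < z))) := by
  cases ys with
  | nil => rfl
  | cons z t =>
    simp only [List.foldl_cons, List.any_cons]
    rw [rowFold_some, foldl_pair min max t z z]
    simp only [foldl_min_lt, foldl_max_gt]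

theorem any_filter_map_snd (pts : List (Int × Int)) (f : Int × Int → Bool) (g : Int → Bool) :
    ((pts.filter f).map Prod.snd).any g = pts.any (fun p => f p && g p.2) := by
  induction pts with
  | nil => rfl
  | cons p t ih =>
    simp only [List.filter_cons]
    by_cases h : f p <;> simp [h, ih]

theorem any_filter_map_fst (pts : List (Int × Int)) (f : Int × Int → Bool) (g : Int → Bool) :
    ((pts.filter f).map Prod.fst).any g = pts.any (fun p => f p && g p.1) := by
  induction pts with
  | nil => rfl
  | cons p t ih =>
    simp only [List.filter_cons]
    by_cases h : f p <;> simp [h, ih]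

-- A's per-point condition against the two dicts = B's four scans
theorem cond_eq_covered (pts : List (Int × Int)) (x y : Int) :
    (cbCond (pts.foldl (fun d p => cbStep d p.1 p.2) PySem.Dict.empty) x y &&
     cbCond (pts.foldl (fun d p => cbStep d p.2 p.1) PySem.Dict.empty) y x) =
    cbCovered pts x y := by
  have hcolAux : (pts.foldl (fun d p => cbStep d p.2 p.1) PySem.Dict.empty) =
      ((pts.map Prod.swap).foldl (fun d p => cbStep d p.1 p.2) PySem.Dict.empty) := by
    rw [List.foldl_map]
    rfl
  unfold cbCond
  rw [cbStep_get pts PySem.Dict.empty x, hcolAux,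
      cbStep_get (pts.map Prod.swap) PySem.Dict.empty y]
  simp only [PySem.Dict.get?_empty]
  rw [cond_rowFold, cond_rowFold]
  unfold cbCovered
  have hswap : ∀ (f : Int × Int → Bool),
      (pts.map Prod.swap).filter f = (pts.filter (fun p => f p.swap)).map Prod.swap := by
    intro f; rw [List.filter_map]; rfl
  rw [hswap, List.map_map]
  have hms : ((pts.filter fun p => (Prod.swap p).1 == y).map (Prod.snd ∘ Prod.swap)) =
      ((pts.filter fun p => p.2 == y).map Prod.fst) := by
    simp [Prod.swap, Function.comp]
  rw [hms]
  rw [any_filter_map_snd, any_filter_map_snd, any_filter_map_fst, any_filter_map_fst]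
  ac_rfl

theorem foldl_count (pts : List (Int × Int)) (c : Int × Int → Bool) (s : Int) :
    pts.foldl (fun s p => if c p then s + 1 else s) s = s + (pts.countP c : Nat) := by
  induction pts generalizing s with
  | nil => simp
  | cons p t ih =>
    simp only [List.foldl_cons, List.countP_cons]
    by_cases h : c p <;> simp [h, ih] <;> push_cast <;> ring

-- ===== VERDICT (by name: the statement is the Claim_ definition above) =====
theorem countCoveredBuildings_spec : Claim_equal_countCoveredBuildings := by
  intro n buildings _ _
  unfold Spec_countCoveredBuildings countCoveredBuildings countCoveredBuildings_alt
  simp only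
  rw [foldl_pair (fun d (p : Int × Int) => cbStep d p.1 p.2)
        (fun d (p : Int × Int) => cbStep d p.2 p.1)]
  have hfun : (fun p : Int × Int =>
      cbCond ((buildings.map pvPt).foldl (fun d p => cbStep d p.1 p.2) PySem.Dict.empty) p.1 p.2 &&
      cbCond ((buildings.map pvPt).foldl (fun d p => cbStep d p.2 p.1) PySem.Dict.empty) p.2 p.1) =
      (fun p => cbCovered (buildings.map pvPt) p.1 p.2) :=
    funext fun p => cond_eq_covered (buildings.map pvPt) p.1 p.2
  calc ((buildings.map pvPt).foldl
          (fun s p => if cbCond ((buildings.map pvPt).foldl (fun d p => cbStep d p.1 p.2) PySem.Dict.empty) p.1 p.2 &&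
                         cbCond ((buildings.map pvPt).foldl (fun d p => cbStep d p.2 p.1) PySem.Dict.empty) p.2 p.1
                      then s + 1 else s) 0)
      = 0 + (((buildings.map pvPt).countP (fun p =>
          cbCond ((buildings.map pvPt).foldl (fun d p => cbStep d p.1 p.2) PySem.Dict.empty) p.1 p.2 &&
          cbCond ((buildings.map pvPt).foldl (fun d p => cbStep d p.2 p.1) PySem.Dict.empty) p.2 p.1) : Nat) : Int) :=
        foldl_count _ _ 0
    _ = (((buildings.map pvPt).countP (fun p => cbCovered (buildings.map pvPt) p.1 p.2) : Nat) : Int) := by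
        rw [hfun, zero_add]
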